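-- pv_equiv track=rewrite | github.com/sufian-sani/python-code | Python Practics/geeksforgeeks/List Programs/28_printDuplicatevalueinlist.py | repert
-- ===== SOURCE A (Python) =====
-- def repert(x):
--     length=len(x)
--     u_list = []
--     for i in range(length):
--         k=i+1
--         for j in range(k,length):
--             if x[i] == x[j] and x[i] not in u_list:
--                 u_list.append(x[i])
--     return u_list
-- ===== SOURCE B (Python) =====
-- def repert(x):
--     cnt = {}
--     for v in x:
--         cnt[v] = cnt.get(v, 0) + 1
--     seen = set()
--     out = []
--     for v in x:
--         if v not in seen:
--             seen.add(v)
--             if cnt[v] > 1: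
--                 out.append(v)
--     return out
-- ===== Notes on version B (the rewrite author's own statement) =====
-- stated objective: faster
-- what changed: Replaced the nested index scan (for each i, scan all later j and a membership test on the output list) by a one-pass frequency table plus a single forward pass with a seen-set that emits each value at its first occurrence when its count exceeds 1.
import Mathlib
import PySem

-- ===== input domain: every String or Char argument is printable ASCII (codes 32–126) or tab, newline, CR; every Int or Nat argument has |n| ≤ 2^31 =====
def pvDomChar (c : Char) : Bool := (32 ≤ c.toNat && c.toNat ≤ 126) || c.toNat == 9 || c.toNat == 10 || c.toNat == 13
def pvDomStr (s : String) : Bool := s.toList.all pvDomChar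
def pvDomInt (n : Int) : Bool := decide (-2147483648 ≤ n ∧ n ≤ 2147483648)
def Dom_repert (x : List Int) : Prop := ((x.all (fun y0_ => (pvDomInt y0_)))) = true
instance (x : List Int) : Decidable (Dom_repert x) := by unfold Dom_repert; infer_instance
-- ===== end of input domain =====

-- B replaces A's nested O(n^2) index scan by a frequency table plus one forward pass (faster, asymptotic).

-- ===== PORT A =====
-- x[i] / x[j] are always indexed with 0 ≤ i,j < len(x), so pyGetD is exact here.
def repert (x : List Int) : List Int :=
  let length : Int := (x.length : Int)
  (PySem.List.pyRange 0 length 1).foldl (fun u_list i =>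
    let k := i + 1
    (PySem.List.pyRange k length 1).foldl (fun u_list j =>
      if PySem.List.pyGetD x i 0 == PySem.List.pyGetD x j 0
           && !(u_list.contains (PySem.List.pyGetD x i 0))
      then u_list ++ [PySem.List.pyGetD x i 0] else u_list) u_list) []

-- ===== PORT B =====
-- cnt[v] is looked up only for v ∈ x, where the key is always present, so getD 0 is exact.
def repert_alt (x : List Int) : List Int :=
  let cnt : PySem.Dict Int Int := x.foldl (fun d v => d.modify v 0 (· + 1)) PySem.Dict.empty
  let st := x.foldl (fun (st : PySem.Set Int × List Int) v =>
      if PySem.Set.contains st.1 v then st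
      else (PySem.Set.add st.1 v, if 1 < cnt.getD v 0 then st.2 ++ [v] else st.2))
    ((PySem.Set.empty : PySem.Set Int), ([] : List Int))
  st.2

-- ===== PRECONDITION & SPEC =====
def Spec_repert (x : List Int) (out : List Int) : Prop := out = repert_alt x
instance (x : List Int) (out : List Int) : Decidable (Spec_repert x out) := by unfold Spec_repert; infer_instance

-- ===== CLAIM (what is proved, stated in full; the proofs are below) =====
def Claim_equal_repert : Prop := ∀ (x : List Int), Dom_repert x → Spec_repert x (repert x)

-- ===== LEMMAS AND PROOFS =====

def aRun : List Int → List Int → List Int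
  | u, [] => u
  | u, v :: r => aRun (if v ∈ r ∧ v ∉ u then u ++ [v] else u) r

lemma inner_eq (v : Int) : ∀ (r u : List Int),
    r.foldl (fun u w => if v == w && !(u.contains v) then u ++ [v] else u) u
      = if v ∈ r ∧ v ∉ u then u ++ [v] else u := by
  intro r
  induction r with
  | nil => intro u; simp
  | cons w r ih =>
    intro u
    rw [List.foldl_cons, ih]
    by_cases hvw : v = w <;> by_cases hvu : v ∈ u <;>
      simp [hvw, hvu] <;> simp_all

lemma outer_eq (x : List Int) : ∀ (n k : Nat), x.length - k = n → k ≤ x.length → ∀ (u : List Int),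
    (PySem.List.pyRange (k : Int) (x.length : Int) 1).foldl (fun u_list i =>
      (PySem.List.pyRange (i + 1) (x.length : Int) 1).foldl (fun u_list j =>
        if PySem.List.pyGetD x i 0 == PySem.List.pyGetD x j 0
             && !(u_list.contains (PySem.List.pyGetD x i 0))
        then u_list ++ [PySem.List.pyGetD x i 0] else u_list) u_list) u
      = aRun u (x.drop k) := by
  intro n
  induction n with
  | zero =>
    intro k hn hk u
    have hkl : k = x.length := by omega
    subst hkl
    rw [PySem.List.pyRange_one_eq_nil (by omega)]
    simp [aRun]
  | succ n ih =>
    intro k hn hk u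
    have hklt : k < x.length := by omega
    rw [PySem.List.pyRange_one_cons (by exact_mod_cast hklt)]
    rw [List.foldl_cons]
    have hcast : ((k : Int) + 1) = (((k + 1 : Nat)) : Int) := by push_cast; ring
    rw [hcast]
    rw [PySem.List.foldl_pyRange_pyGetD' x 0
      (fun u w => if PySem.List.pyGetD x (k : Int) 0 == w
            && !(u.contains (PySem.List.pyGetD x (k : Int) 0))
          then u ++ [PySem.List.pyGetD x (k : Int) 0] else u) u (by positivity)]
    rw [inner_eq]
    rw [ih (k+1) (by omega) (by omega)]
    have hdrop : x.drop k = x[k] :: x.drop (k+1) := List.drop_eq_getElem_cons hklt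
    have hv : PySem.List.pyGetD x (k : Int) 0 = x[k] := by
      simp [List.getD_eq_getElem?_getD, hklt]
    rw [hdrop, hv]
    simp [aRun]

lemma main_eq (x : List Int) : ∀ (r p u seen : List Int), x = p ++ r →
    (∀ w : Int, w ∈ seen ↔ w ∈ p) →
    (∀ w : Int, w ∈ u ↔ w ∈ p ∧ 2 ≤ x.count w) →
    aRun u r = (r.foldl (fun (st : PySem.Set Int × List Int) v =>
        if PySem.Set.contains st.1 v then st
        else (PySem.Set.add st.1 v, if 1 < (x.count v : Int) then st.2 ++ [v] else st.2))
      (seen, u)).2 := by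
  intro r
  induction r with
  | nil => intro p u seen _ _ _; simp [aRun]
  | cons v r ih =>
    intro p u seen hx hseen hu
    have hcnt : x.count v = p.count v + 1 + r.count v := by
      subst hx; simp [List.count_append]; ring
    rw [List.foldl_cons]
    by_cases hvp : v ∈ p
    · -- v already scanned: both sides do nothing
      have hvu : v ∈ u := by
        refine (hu v).2 ⟨hvp, ?_⟩
        have := List.one_le_count_iff.mpr hvp
        omega
      have hA : (if v ∈ r ∧ v ∉ u then u ++ [v] else u) = u := by simp [hvu]
      have hB : PySem.Set.contains seen v = true := by
        rw [PySem.Set.contains_iff]; exact (hseen v).2 hvp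
      rw [hB]
      simp only [aRun, hA]
      exact ih (p ++ [v]) u seen (by simp [hx])
        (fun w => by
          rw [hseen w]
          constructor
          · intro h; simp [h]
          · intro h; rcases List.mem_append.1 h with h | h
            · exact h
            · simp at h; subst h; exact hvp)
        (fun w => by
          rw [hu w]
          constructor
          · rintro ⟨h1, h2⟩; exact ⟨by simp [h1], h2⟩
          · rintro ⟨h1, h2⟩
            refine ⟨?_, h2⟩
            rcases List.mem_append.1 h1 with h | h
            · exact h
            · simp at h; subst h; exact hvp)
    · -- first occurrence of v
      have hvseen : PySem.Set.contains seen v = false := by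
        rw [Bool.eq_false_iff]
        intro h
        rw [PySem.Set.contains_iff] at h
        exact hvp ((hseen v).1 h)
      have hvu : v ∉ u := fun h => hvp ((hu v).1 h).1
      have hpcount : p.count v = 0 := List.count_eq_zero.mpr hvp
      have hcond : (1 < (x.count v : Int)) ↔ v ∈ r := by
        rw [hcnt, hpcount]
        constructor
        · intro h; have : 1 ≤ r.count v := by exact_mod_cast (by push_cast at h ⊢; omega)
          exact List.one_le_count_iff.mp this
        · intro h; have := List.one_le_count_iff.mpr h; push_cast; omega
      rw [hvseen]
      rw [if_neg (show ¬ (false = true) from by decide)]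
      simp only [aRun]
      have hifeq : (if 1 < (x.count v : Int) then u ++ [v] else u)
          = (if v ∈ r ∧ v ∉ u then u ++ [v] else u) := by
        simp [hvu, hcond]
      rw [hifeq]
      refine ih (p ++ [v]) _ _ (by simp [hx]) ?_ ?_
      · intro w
        rw [PySem.Set.mem_add, hseen w]
        simp [or_comm]
      · intro w
        by_cases hwv : w = v
        · subst hwv
          by_cases hwr : w ∈ r
          · have : 2 ≤ x.count w := by
              have := List.one_le_count_iff.mpr hwr; omega
            simp [hwr, hvu, this]
          · have : x.count w = 1 := by
              have := List.count_eq_zero.mpr hwr; omega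
            simp [hwr, hvu, hvp, this]
        · rw [show (if v ∈ r ∧ v ∉ u then u ++ [v] else u)
              = if v ∈ r then u ++ [v] else u by simp [hvu]]
          by_cases hvr : v ∈ r <;>
            simp [hvr, hu w, hwv]

-- ===== VERDICT (by name: the statement is the Claim_ definition above) =====
theorem repert_spec : Claim_equal_repert := by
  intro x _
  unfold Spec_repert
  have hA : repert x = aRun [] x := by
    unfold repert
    dsimp only
    have h := outer_eq x x.length 0 (by omega) (by omega) []
    simpa using h
  have hB : repert_alt x
      = (x.foldl (fun (st : PySem.Set Int × List Int) v =>
          if PySem.Set.contains st.1 v then st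
          else (PySem.Set.add st.1 v,
            if 1 < (x.count v : Int) then st.2 ++ [v] else st.2))
        ((PySem.Set.empty : PySem.Set Int), ([] : List Int))).2 := by
    unfold repert_alt
    simp [PySem.Dict.getD_foldl_modify_add_one]
  rw [hA, hB]
  exact main_eq x x [] [] [] (by simp) (by simp) (by simp)
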